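-- pv_equiv track=rewrite | github.com/perepelkinnn/IRC-Client | main.py | sort_nicks
-- ===== SOURCE A (Python) =====
-- def sort_nicks(names):
--     sorted_names = []
--     non_op = []
--     for name in names:
--         if name[0] == '@':
--             sorted_names.append(name)
--         else:
--             non_op.append(name)
--     sorted_names.extend(non_op)
--     return sorted_names
-- ===== SOURCE B (Python) =====
-- def sort_nicks(names):
--     return sorted(names, key=lambda name: name[0] != '@')
-- ===== Notes on version B (the rewrite author's own statement) =====
-- stated objective: idiomatic
-- what changed: Replaces the explicit two-accumulator partition loop with a single stable sort on the boolean key name[0] != '@', which puts '@'-prefixed names first while preserving relative order.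
import Mathlib
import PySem

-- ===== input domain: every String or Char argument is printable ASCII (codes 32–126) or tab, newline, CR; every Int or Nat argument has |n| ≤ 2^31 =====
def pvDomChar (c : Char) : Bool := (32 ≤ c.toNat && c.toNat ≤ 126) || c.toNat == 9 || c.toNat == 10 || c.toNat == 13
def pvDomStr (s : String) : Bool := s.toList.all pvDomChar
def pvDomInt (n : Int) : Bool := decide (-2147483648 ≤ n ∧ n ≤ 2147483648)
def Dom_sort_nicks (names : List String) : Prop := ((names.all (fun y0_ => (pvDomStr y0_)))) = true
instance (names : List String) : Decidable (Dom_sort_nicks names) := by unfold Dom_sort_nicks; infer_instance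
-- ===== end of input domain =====

-- B replaces A's explicit two-list partition loop by one stable sort on the boolean key
-- name[0] != '@' (idiomatic, same result; not claimed faster).


-- ===== PORT A =====
-- A: one pass appending '@'-prefixed names to one list, the rest to another, then concatenate.
-- name[0] is PySem.Str.pyGet? name 0; the none case (empty string = IndexError) is outside Pre_.
def sort_nicks (names : List String) : List String :=
  let p := names.foldl
    (fun (acc : List String × List String) name =>
      if PySem.Str.pyGet? name 0 = some '@' then (acc.1 ++ [name], acc.2)
      else (acc.1, acc.2 ++ [name]))
    ([], [])
  p.1 ++ p.2

-- ===== PORT B =====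
-- B: stable sort by the boolean key name[0] != '@' (false < true, so operators first).
def sort_nicks_alt (names : List String) : List String :=
  PySem.List.sorted names (fun name => decide (PySem.Str.pyGet? name 0 ≠ some '@')) false

-- ===== PRECONDITION & SPEC =====
-- Pre_ excludes lists containing an empty string, on which both A and B raise IndexError at name[0].
def Pre_sort_nicks (names : List String) : Prop := ∀ n ∈ names, n ≠ ""
instance (names : List String) : Decidable (Pre_sort_nicks names) := by unfold Pre_sort_nicks; infer_instance
def pvWitness_sort_nicks : List String := ["bob", "@alice", "eve", "@carol"]
def Spec_sort_nicks (names : List String) (out : List String) : Prop := out = sort_nicks_alt names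
instance (names : List String) (out : List String) : Decidable (Spec_sort_nicks names out) := by unfold Spec_sort_nicks; infer_instance

-- ===== CLAIM (what is proved, stated in full; the proofs are below) =====
def Claim_equal_sort_nicks : Prop := ∀ (names : List String), Dom_sort_nicks names → Pre_sort_nicks names → Spec_sort_nicks names (sort_nicks names)

-- ===== LEMMAS AND PROOFS =====

-- inserting an element whose `before` test fails on all of F and succeeds on T's head lands between them
theorem insertBy_mid {α : Type} (before : α → α → Bool) (x : α) (F T : List α)
    (hF : ∀ f ∈ F, before x f = false)
    (hT : ∀ t ts, T = t :: ts → before x t = true) :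
    PySem.List.insertBy before x (F ++ T) = F ++ x :: T := by
  induction F with
  | nil =>
    cases T with
    | nil => simp [PySem.List.insertBy]
    | cons t ts => simp [PySem.List.insertBy, hT t ts rfl]
  | cons f fs ih =>
    simp [PySem.List.insertBy, hF f (by simp)]
    exact ih (fun g hg => hF g (by simp [hg]))

-- a stable sort on a Bool-valued key is exactly the false-key elements followed by the true-key ones
theorem foldl_insertBy_bool {α : Type} (key : α → Bool) (xs F T : List α)
    (hF : ∀ f ∈ F, key f = false) (hT : ∀ t ∈ T, key t = true) :
    xs.foldl (fun acc x => PySem.List.insertBy (fun a b => decide (key a < key b)) x acc) (F ++ T)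
      = (F ++ xs.filter (fun a => key a = false)) ++ (T ++ xs.filter (fun a => key a = true)) := by
  induction xs generalizing F T with
  | nil => simp
  | cons x xs ih =>
    by_cases hx : key x = true
    · have h1 : PySem.List.insertBy (fun a b => decide (key a < key b)) x (F ++ T)
          = F ++ (T ++ [x]) := by
        rw [PySem.List.insertBy_of_forall_not_before _ _ _
          (by intro y _; simp [hx]), List.append_assoc]
      have hT' : ∀ t ∈ T ++ [x], key t = true := by
        intro t ht
        rcases List.mem_append.1 ht with h | h
        · exact hT t h
        · simp at h; simp [h, hx]
      simp only [List.foldl_cons, h1, ih F (T ++ [x]) hF hT']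
      simp [hx]
    · have hx' : key x = false := by simpa using hx
      have h1 : PySem.List.insertBy (fun a b => decide (key a < key b)) x (F ++ T)
          = (F ++ [x]) ++ T := by
        rw [insertBy_mid _ _ F T
          (by intro f hf; simp [hF f hf, hx'])
          (by intro t ts hts; have := hT t (by simp [hts]); simp [this, hx'])]
        simp
      have hF' : ∀ f ∈ F ++ [x], key f = false := by
        intro f hf
        rcases List.mem_append.1 hf with h | h
        · exact hF f h
        · simp at h; simp [h, hx']
      simp only [List.foldl_cons, h1, ih (F ++ [x]) T hF' hT]
      simp [hx']

theorem sorted_bool_eq_partition {α : Type} (key : α → Bool) (xs : List α) :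
    PySem.List.sorted xs key false
      = xs.filter (fun a => key a = false) ++ xs.filter (fun a => key a = true) := by
  rw [PySem.List.sorted_eq_foldl_insertBy]
  have := foldl_insertBy_bool key xs [] [] (by simp) (by simp)
  simpa using this

-- A's loop, characterised: starting from any accumulator it appends the two filters
theorem sort_nicks_foldl (names : List String) (S N : List String) :
    names.foldl
      (fun (acc : List String × List String) name =>
        if PySem.Str.pyGet? name 0 = some '@' then (acc.1 ++ [name], acc.2)
        else (acc.1, acc.2 ++ [name])) (S, N)
      = (S ++ names.filter (fun n => PySem.Str.pyGet? n 0 = some '@'),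
         N ++ names.filter (fun n => ¬ PySem.Str.pyGet? n 0 = some '@')) := by
  induction names generalizing S N with
  | nil => simp
  | cons x xs ih =>
    simp only [List.foldl_cons]
    by_cases hx : PySem.Str.pyGet? x 0 = some '@'
    · rw [if_pos hx, ih]; simp only [PySem.Str.pyGet?, PySem.Chars.pyGet?] at hx; simp [List.filter_cons, hx]
    · rw [if_neg hx, ih]; simp only [PySem.Str.pyGet?, PySem.Chars.pyGet?] at hx; simp [List.filter_cons, hx]

-- ===== VERDICT (by name: the statement is the Claim_ definition above) =====
theorem sort_nicks_spec : Claim_equal_sort_nicks := by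
  intro names _ _
  unfold Spec_sort_nicks sort_nicks sort_nicks_alt
  rw [sorted_bool_eq_partition, sort_nicks_foldl]
  simp only [List.nil_append]
  congr 1 <;> (apply List.filter_congr; intro n _; by_cases h : PySem.Str.pyGet? n 0 = some '@' <;> simp [h])
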